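-- pv_equiv track=rewrite | github.com/supertrained/rhumb | scripts/mint_salesforce_refresh_token.py | _parse_string_list
-- ===== SOURCE A (Python) =====
-- def _dedupe(values: list[str]) -> list[str]:
--     output: list[str] = []
--     seen: set[str] = set()
--     for value in values:
--         if value in seen:
--             continue
--         seen.add(value)
--         output.append(value)
--     return output
--
-- def _parse_string_list(values: list[str] | None) -> list[str]:
--     output: list[str] = []
--     for raw in values or []:
--         for part in str(raw or "").replace(",", " ").split():
--             text = part.strip()
--             if text:
--                 output.append(text)
--     return _dedupe(output)
-- ===== SOURCE B (Python) =====
-- def _parse_string_list(values):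
--     output = []
--     for raw in values or []:
--         buf = []
--         for ch in str(raw or ""):
--             if ch == ',' or ch.isspace():
--                 if buf:
--                     tok = ''.join(buf)
--                     if tok not in output:
--                         output.append(tok)
--                     buf = []
--             else:
--                 buf.append(ch)
--         if buf:
--             tok = ''.join(buf)
--             if tok not in output:
--                 output.append(tok)
--     return output
-- ===== Notes on version B (the rewrite author's own statement) =====
-- stated objective: alternative
-- what changed: B replaces A's replace-then-split tokenization plus a separate seen-set dedup pass with a single character-level scanner: it walks each string char by char with an explicit token buffer, treating ',' and whitespace as delimiters, and dedups each token the moment it is emitted via a membership test on the output list itself (no intermediate token list, no auxiliary set, no library split/replace).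
import Mathlib
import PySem

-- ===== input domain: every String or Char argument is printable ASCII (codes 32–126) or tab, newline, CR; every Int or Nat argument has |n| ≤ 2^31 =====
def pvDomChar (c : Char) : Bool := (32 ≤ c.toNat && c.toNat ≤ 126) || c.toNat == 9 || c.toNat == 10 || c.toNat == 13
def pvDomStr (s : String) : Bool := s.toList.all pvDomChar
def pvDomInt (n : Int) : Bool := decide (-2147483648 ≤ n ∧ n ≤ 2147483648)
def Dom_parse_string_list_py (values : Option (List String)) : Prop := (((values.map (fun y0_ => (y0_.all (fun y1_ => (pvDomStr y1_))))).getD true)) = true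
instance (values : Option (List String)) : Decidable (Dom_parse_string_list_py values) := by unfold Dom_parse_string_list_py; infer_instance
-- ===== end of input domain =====

-- B replaces A's replace+split tokenization and separate seen-set dedup with one char-level
-- scanner that buffers tokens and dedups on emit against the output list; same return value.

-- ===== PORT A =====
-- _dedupe: explicit output list + seen set
def pvDedupeA (values : List String) : List String :=
  (values.foldl
    (fun (st : List String × PySem.Set String) value =>
      if PySem.Set.contains st.2 value then st
      else (st.1 ++ [value], PySem.Set.add st.2 value))
    ([], PySem.Set.empty)).1

def parse_string_list_py (values : Option (List String)) : List String :=
  pvDedupeA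
    ((values.getD []).foldl
      (fun output raw =>
        (PySem.Str.split₀ (PySem.Str.replace (if raw == "" then "" else raw) "," " ")).foldl
          (fun output part =>
            let text := PySem.Str.strip part
            if text ≠ "" then output ++ [text] else output)
          output)
      [])

-- ===== PORT B =====
-- 'if buf: tok = "".join(buf); if tok not in output: output.append(tok)'
def pvEmit (output : List String) (buf : List Char) : List String :=
  if buf = [] then output
  else
    let tok := String.ofList buf
    if tok ∈ output then output else output ++ [tok]

def parse_string_list_py_alt (values : Option (List String)) : List String :=
  (values.getD []).foldl
    (fun output raw =>
      let st := (if raw == "" then "" else raw).toList.foldl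
        (fun (st : List String × List Char) ch =>
          if ch == ',' || PySem.Chars.isspace ch then (pvEmit st.1 st.2, [])
          else (st.1, st.2 ++ [ch]))
        (output, [])
      pvEmit st.1 st.2)
    []

-- ===== PRECONDITION & SPEC =====
def Spec_parse_string_list_py (values : Option (List String)) (out : List String) : Prop := out = parse_string_list_py_alt values
instance (values : Option (List String)) (out : List String) : Decidable (Spec_parse_string_list_py values out) := by unfold Spec_parse_string_list_py; infer_instance

-- ===== CLAIM (what is proved, stated in full; the proofs are below) =====
def Claim_equal_parse_string_list_py : Prop := ∀ (values : Option (List String)), Dom_parse_string_list_py values → Spec_parse_string_list_py values (parse_string_list_py values)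

-- ===== LEMMAS AND PROOFS =====

-- g: what replace "," " " does characterwise
def pvG (c : Char) : Char := if c == ',' then ' ' else c

-- B's delimiter test
def pvSep (c : Char) : Bool := c == ',' || PySem.Chars.isspace c

-- dedup-on-emit step
def pvEmitDedup (o : List String) (t : String) : List String := if t ∈ o then o else o ++ [t]

theorem pvSep_eq (c : Char) : pvSep c = PySem.Chars.isspace (pvG c) := by
  by_cases h : c = ','
  · subst h; decide
  · simp [pvSep, pvG, h]

theorem pvReplaceGo_eq (l : List Char) : ∀ (fuel : Nat) (acc : List Char), l.length ≤ fuel →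
    PySem.Chars.replace.go [','] [' '] fuel l acc = acc.reverse ++ l.map pvG := by
  induction l with
  | nil =>
    intro fuel acc _
    cases fuel <;> simp [PySem.Chars.replace.go]
  | cons c t ih =>
    intro fuel acc hle
    cases fuel with
    | zero => simp at hle
    | succ fuel =>
      have hlen : t.length ≤ fuel := by simp at hle; omega
      by_cases hc : c = ','
      · subst hc
        have hpre : List.isPrefixOf [','] (',' :: t) = true := by
          rw [List.isPrefixOf_cons₂, List.isPrefixOf]; simp
        simp only [PySem.Chars.replace.go, hpre, if_true, List.length_singleton,
          List.drop_succ_cons, List.drop_zero, List.reverse_singleton, List.singleton_append]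
        rw [ih fuel (' ' :: acc) hlen]
        simp [pvG]
      · have hpre : List.isPrefixOf [','] (c :: t) = false := by
          rw [List.isPrefixOf_cons₂, List.isPrefixOf]
          simp only [Bool.and_true, beq_eq_false_iff_ne, ne_eq]
          exact fun hh => hc hh.symm
        simp only [PySem.Chars.replace.go, hpre, Bool.false_eq_true, if_false]
        rw [ih fuel (c :: acc) hlen]
        simp [pvG, hc]

theorem pvReplace_eq_map (s : List Char) :
    PySem.Chars.replace s [','] [' '] = s.map pvG := by
  simp [PySem.Chars.replace, pvReplaceGo_eq s s.length [] le_rfl]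

theorem pvGo_nil (cur : List Char) (acc : List (List Char)) :
    PySem.Chars.split₀.go [] cur acc =
      if cur.isEmpty then acc.reverse else (cur.reverse :: acc).reverse := by
  simp only [PySem.Chars.split₀.go]

theorem pvGo_cons (c : Char) (rest cur : List Char) (acc : List (List Char)) :
    PySem.Chars.split₀.go (c :: rest) cur acc =
      if PySem.Chars.isspace c then
        (if cur.isEmpty then PySem.Chars.split₀.go rest [] acc
         else PySem.Chars.split₀.go rest [] (cur.reverse :: acc))
      else PySem.Chars.split₀.go rest (c :: cur) acc := by
  simp only [PySem.Chars.split₀.go]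

-- split₀.go: accumulator factors out
theorem pvSplitGo_acc (l : List Char) : ∀ (cur : List Char) (acc : List (List Char)),
    PySem.Chars.split₀.go l cur acc = acc.reverse ++ PySem.Chars.split₀.go l cur [] := by
  induction l with
  | nil =>
    intro cur acc
    rw [pvGo_nil, pvGo_nil]
    by_cases h : cur.isEmpty <;> simp [h]
  | cons c rest ih =>
    intro cur acc
    rw [pvGo_cons, pvGo_cons]
    by_cases hc : PySem.Chars.isspace c
    · by_cases hcur : cur.isEmpty
      · simp only [hc, hcur, if_true]
        exact ih [] acc
      · simp only [hc, hcur, if_true, if_false, Bool.false_eq_true]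
        rw [ih [] (cur.reverse :: acc), ih [] [cur.reverse]]
        simp
    · simp only [hc, Bool.false_eq_true, if_false]
      exact ih (c :: cur) acc

-- tokens of split₀ are nonempty and whitespace-free
theorem pvSplitGo_tokens (l : List Char) : ∀ (cur : List Char),
    (∀ c ∈ cur, PySem.Chars.isspace c = false) →
    ∀ t ∈ PySem.Chars.split₀.go l cur [], t ≠ [] ∧ ∀ c ∈ t, PySem.Chars.isspace c = false := by
  induction l with
  | nil =>
    intro cur hcur t ht
    rw [pvGo_nil] at ht
    by_cases h : cur.isEmpty
    · simp [h] at ht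
    · simp only [h, if_false, Bool.false_eq_true, List.reverse_cons, List.reverse_nil,
        List.nil_append, List.mem_singleton] at ht
      subst ht
      refine ⟨by simpa [List.isEmpty_iff] using h, fun c hc => hcur c (by simpa using hc)⟩
  | cons c rest ih =>
    intro cur hcur t ht
    rw [pvGo_cons] at ht
    by_cases hc : PySem.Chars.isspace c
    · rw [if_pos hc] at ht
      by_cases hcur0 : cur.isEmpty
      · rw [if_pos hcur0] at ht
        exact ih [] (by simp) t ht
      · rw [if_neg hcur0, pvSplitGo_acc rest [] [cur.reverse]] at ht
        simp only [List.reverse_cons, List.reverse_nil, List.nil_append, List.mem_append,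
          List.mem_singleton] at ht
        rcases ht with ht | ht
        · subst ht
          refine ⟨by simpa [List.isEmpty_iff] using hcur0, fun x hx => hcur x (by simpa using hx)⟩
        · exact ih [] (by simp) t ht
    · rw [if_neg hc] at ht
      refine ih (c :: cur) ?_ t ht
      intro x hx
      rcases List.mem_cons.1 hx with h | h
      · subst h; simpa using hc
      · exact hcur x h

theorem pvSplit_tokens (s : List Char) :
    ∀ t ∈ PySem.Chars.split₀ s, t ≠ [] ∧ ∀ c ∈ t, PySem.Chars.isspace c = false := by
  exact pvSplitGo_tokens s [] (by simp)

theorem pvDropWhile_id {p : Char → Bool} (l : List Char) (h : ∀ c ∈ l, p c = false) :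
    l.dropWhile p = l := by
  cases l with
  | nil => rfl
  | cons c t => simp [List.dropWhile, h c (by simp)]

theorem pvStrip_id (t : List Char) (h : ∀ c ∈ t, PySem.Chars.isspace c = false) :
    PySem.Chars.strip t = t := by
  unfold PySem.Chars.strip PySem.Chars.lstrip PySem.Chars.rstrip
  rw [pvDropWhile_id t h, pvDropWhile_id t.reverse (by intro c hc; exact h c (by simpa using hc))]
  simp

-- the inner A-loop over the token list just appends it
theorem pvInner_append (ts : List String)
    (h : ∀ t ∈ ts, PySem.Str.strip t = t ∧ t ≠ "") :
    ∀ out : List String,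
      ts.foldl (fun output part =>
        if PySem.Str.strip part ≠ "" then output ++ [PySem.Str.strip part] else output) out
        = out ++ ts := by
  induction ts with
  | nil => intro out; simp
  | cons t rest ih =>
    intro out
    obtain ⟨hs, hne⟩ := h t (by simp)
    simp only [List.foldl_cons, hs, if_pos hne]
    rw [ih (fun x hx => h x (by simp [hx]))]
    simp

theorem pvTokens_good (s : List Char) :
    ∀ t ∈ (PySem.Chars.split₀ s).map String.ofList, PySem.Str.strip t = t ∧ t ≠ "" := by
  intro t ht
  simp only [List.mem_map] at ht
  obtain ⟨ct, hct, rfl⟩ := ht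
  obtain ⟨hne, hsp⟩ := pvSplit_tokens s ct hct
  constructor
  · simp [PySem.Str.strip, String.toList_ofList, pvStrip_id ct hsp]
  · intro h
    exact hne (by simpa [String.ofList_inj] using h.trans rfl)

-- A's dedupe loop equals foldl over pvEmitDedup
theorem pvDedupe_foldl (l : List String) : ∀ (s : List String),
    (l.foldl (fun (st : List String × PySem.Set String) value =>
      if PySem.Set.contains st.2 value then st
      else (st.1 ++ [value], PySem.Set.add st.2 value)) (s, s)).1 = l.foldl pvEmitDedup s := by
  induction l with
  | nil => intro s; rfl
  | cons x rest ih =>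
    intro s
    rw [List.foldl_cons, List.foldl_cons]
    by_cases h : x ∈ s
    · have hc : PySem.Set.contains s x = true := by simpa [PySem.Set.contains] using h
      rw [if_pos hc, show pvEmitDedup s x = s from by simp [pvEmitDedup, h]]
      exact ih s
    · have hc : ¬ PySem.Set.contains s x = true := by simpa [PySem.Set.contains] using h
      rw [if_neg hc,
          show PySem.Set.add s x = s ++ [x] from by simp [PySem.Set.add, h],
          show pvEmitDedup s x = s ++ [x] from by simp [pvEmitDedup, h]]
      exact ih (s ++ [x])

theorem pvDedupeA_eq (l : List String) : pvDedupeA l = l.foldl pvEmitDedup [] := by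
  unfold pvDedupeA
  exact pvDedupe_foldl l []

-- tokens produced by A for one raw string
def pvToks (raw : String) : List String :=
  PySem.Str.split₀ (PySem.Str.replace raw "," " ")

theorem pvIte_id (raw : String) : (if raw == "" then "" else raw) = raw := by
  by_cases h : raw = "" <;> simp [h]

theorem pvOuter_flatMap (l : List String) : ∀ out : List String,
    l.foldl (fun output raw =>
      (PySem.Str.split₀ (PySem.Str.replace (if raw == "" then "" else raw) "," " ")).foldl
        (fun output part =>
          if PySem.Str.strip part ≠ "" then output ++ [PySem.Str.strip part] else output)
        output) out = out ++ l.flatMap pvToks := by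
  induction l with
  | nil => intro out; simp
  | cons raw rest ih =>
    intro out
    simp only [List.foldl_cons]
    rw [pvIte_id raw]
    have hgood : ∀ t ∈ pvToks raw, PySem.Str.strip t = t ∧ t ≠ "" := by
      intro t ht
      apply pvTokens_good ((PySem.Str.replace raw "," " ").toList)
      simpa [pvToks, PySem.Str.split₀] using ht
    rw [show PySem.Str.split₀ (PySem.Str.replace raw "," " ") = pvToks raw from rfl,
        pvInner_append (pvToks raw) hgood out, ih (out ++ pvToks raw)]
    simp [pvToks]

theorem pvComma : (("," : String)).toList = [','] := by decide
theorem pvSpace : ((" " : String)).toList = [' '] := by decide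

-- B's char scanner over l, started with buffer buf, emits exactly the split₀-tokens of
-- (buf ++ l) after the pvG comma→space map, deduped on emit.
theorem pvScan_eq (l : List Char) : ∀ (out : List String) (buf : List Char),
    pvEmit ((l.foldl
        (fun (st : List String × List Char) ch =>
          if ch == ',' || PySem.Chars.isspace ch then (pvEmit st.1 st.2, [])
          else (st.1, st.2 ++ [ch]))
        (out, buf))).1
      ((l.foldl
        (fun (st : List String × List Char) ch =>
          if ch == ',' || PySem.Chars.isspace ch then (pvEmit st.1 st.2, [])
          else (st.1, st.2 ++ [ch]))
        (out, buf))).2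
    = (PySem.Chars.split₀.go (l.map pvG) buf.reverse []).foldl
        (fun o t => pvEmitDedup o (String.ofList t)) out := by
  induction l with
  | nil =>
    intro out buf
    rw [List.map_nil, pvGo_nil]
    by_cases h : buf = []
    · subst h; simp [pvEmit]
    · have hbe : (buf.reverse.isEmpty) = false := by simp [h]
      simp only [List.foldl_nil, hbe, Bool.false_eq_true, if_false, List.reverse_cons,
        List.reverse_nil, List.nil_append, List.reverse_reverse]
      simp [pvEmit, pvEmitDedup, h]
  | cons c rest ih =>
    intro out buf
    rw [List.map_cons, pvGo_cons, List.foldl_cons]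
    have hs : (c == ',' || PySem.Chars.isspace c) = pvSep c := rfl
    cases hsep : pvSep c with
    | true =>
      have hg : PySem.Chars.isspace (pvG c) = true := (pvSep_eq c) ▸ hsep
      simp only [hs, hsep, if_true, hg]
      by_cases hb : buf = []
      · subst hb
        simp only [List.reverse_nil, List.isEmpty_nil, if_true]
        rw [show pvEmit out ([] : List Char) = out from by simp [pvEmit]]
        exact ih out []
      · have hbe : (buf.reverse.isEmpty) = false := by simp [hb]
        rw [hbe]
        simp only [Bool.false_eq_true, if_false]
        rw [List.reverse_reverse, pvSplitGo_acc (rest.map pvG) [] [buf]]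
        simp only [List.reverse_cons, List.reverse_nil, List.nil_append, List.foldl_append,
          List.foldl_cons, List.foldl_nil]
        rw [show pvEmitDedup out (String.ofList buf) = pvEmit out buf from by
              simp [pvEmit, pvEmitDedup, hb]]
        exact ih (pvEmit out buf) []
    | false =>
      have hg : PySem.Chars.isspace (pvG c) = false := (pvSep_eq c) ▸ hsep
      have hgc : pvG c = c := by
        have h' := hsep
        unfold pvSep at h'
        simp [pvG, (Bool.or_eq_false_iff.1 h').1]
      simp only [hs, hsep, Bool.false_eq_true, if_false, hg]
      rw [hgc, show c :: buf.reverse = (buf ++ [c]).reverse from by simp]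
      exact ih out (buf ++ [c])

-- B for one raw string continues the dedup fold over that string's tokens
theorem pvScanRaw (raw : String) (out : List String) :
    (let st := (if raw == "" then "" else raw).toList.foldl
        (fun (st : List String × List Char) ch =>
          if ch == ',' || PySem.Chars.isspace ch then (pvEmit st.1 st.2, [])
          else (st.1, st.2 ++ [ch]))
        (out, [])
     pvEmit st.1 st.2) = (pvToks raw).foldl pvEmitDedup out := by
  show pvEmit _ _ = _
  rw [pvIte_id raw, pvScan_eq raw.toList out []]
  simp only [List.reverse_nil]
  have h : pvToks raw = (PySem.Chars.split₀ (raw.toList.map pvG)).map String.ofList := by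
    simp only [pvToks, PySem.Str.split₀, PySem.Str.replace, String.toList_ofList, pvComma, pvSpace]
    rw [pvReplace_eq_map]
  rw [h, List.foldl_map]
  rfl

-- folding pvEmitDedup over a flatMap = folding the per-string folds
theorem pvFold_flatMap (l : List String) : ∀ out : List String,
    l.foldl (fun out raw => (pvToks raw).foldl pvEmitDedup out) out
      = (l.flatMap pvToks).foldl pvEmitDedup out := by
  induction l with
  | nil => intro out; simp
  | cons raw rest ih =>
    intro out
    rw [List.foldl_cons, List.flatMap_cons, List.foldl_append, ih]

-- ===== VERDICT (by name: the statement is the Claim_ definition above) =====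
theorem parse_string_list_py_spec : Claim_equal_parse_string_list_py := by
  intro values _
  unfold Spec_parse_string_list_py
  simp only [parse_string_list_py, parse_string_list_py_alt]
  rw [pvOuter_flatMap (values.getD []) [], List.nil_append, pvDedupeA_eq]
  rw [show (fun (output : List String) raw =>
        (let st := (if raw == "" then "" else raw).toList.foldl
            (fun (st : List String × List Char) ch =>
              if ch == ',' || PySem.Chars.isspace ch then (pvEmit st.1 st.2, [])
              else (st.1, st.2 ++ [ch]))
            (output, [])
         pvEmit st.1 st.2))
      = fun out raw => (pvToks raw).foldl pvEmitDedup out from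
        funext fun out => funext fun raw => pvScanRaw raw out]
  rw [pvFold_flatMap]
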